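-- pv_equiv track=rewrite | github.com/jasonwei20/text_discovery_nn | code/z_find_notable_parts.py | find_notable_lines
-- ===== SOURCE A (Python) =====
-- def find_notable_lines(line_numbers):
--
-- 	notable_line_numbers = []
-- 	#notable if 3/7 or 2/4
-- 	for line_number in line_numbers:
-- 		for i in range(line_number-2, line_number+3):
-- 			if not i == line_number and i in line_numbers:
-- 				notable_line_numbers.append(line_number)
-- 				break
-- 	return notable_line_numbers
-- ===== SOURCE B (Python) =====
-- def find_notable_lines(line_numbers):
--     # One sorted-adjacency scan over the distinct values, then a lookup pass.
--     uniq = sorted(set(line_numbers))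
--     notable = set()
--     for a, b in zip(uniq, uniq[1:]):
--         if b - a <= 2:
--             notable.add(a)
--             notable.add(b)
--     return [x for x in line_numbers if x in notable]
-- ===== Notes on version B (the rewrite author's own statement) =====
-- stated objective: faster
-- what changed: Replaces the per-element window scan over range(x-2,x+3) with repeated linear 'in' tests by one sort of the distinct values, a single adjacent-gap scan marking notable values, and a set-membership filter pass over the original list.
import Mathlib
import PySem

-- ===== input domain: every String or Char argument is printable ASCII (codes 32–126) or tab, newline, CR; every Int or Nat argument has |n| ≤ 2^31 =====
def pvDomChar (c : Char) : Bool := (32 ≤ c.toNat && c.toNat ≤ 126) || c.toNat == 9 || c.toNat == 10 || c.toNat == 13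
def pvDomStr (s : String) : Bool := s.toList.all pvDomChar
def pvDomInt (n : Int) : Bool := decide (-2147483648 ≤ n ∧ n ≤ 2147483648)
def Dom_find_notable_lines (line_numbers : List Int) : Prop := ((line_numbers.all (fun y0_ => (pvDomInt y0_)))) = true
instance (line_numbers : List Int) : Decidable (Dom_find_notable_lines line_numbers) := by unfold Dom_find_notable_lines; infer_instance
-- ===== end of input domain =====

-- B replaces A's quadratic per-element ±2 window scan (with linear 'in' tests) by a sort of the
-- distinct values, one adjacent-gap scan marking notable values, and a membership filter pass.

-- ===== PORT A =====
-- inner 'for i in range(x-2, x+3): if not i == x and i in line_numbers: append(x); break'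
-- rendered as a short-circuit any over the same range (the break makes at most one append).
def find_notable_lines (line_numbers : List Int) : List Int :=
  line_numbers.foldl
    (fun acc line_number =>
      if (PySem.List.pyRange (line_number - 2) (line_number + 3) 1).any
           (fun i => !(i == line_number) && line_numbers.contains i)
      then acc ++ [line_number] else acc) []

-- ===== PORT B =====
-- the zip(uniq, uniq[1:]) loop of Source B: walk adjacent pairs, adding both ends of each close pair
def pvMarkPairs : List Int → PySem.Set Int → PySem.Set Int
  | a :: b :: rest, s =>
      pvMarkPairs (b :: rest) (if b - a ≤ 2 then PySem.Set.add (PySem.Set.add s a) b else s)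
  | _, s => s

def find_notable_lines_alt (line_numbers : List Int) : List Int :=
  let uniq := PySem.List.sorted (PySem.Set.ofList line_numbers) (fun x => x) false
  let notable := pvMarkPairs uniq PySem.Set.empty
  line_numbers.filter (fun x => PySem.Set.contains notable x)

-- ===== PRECONDITION & SPEC =====
def Spec_find_notable_lines (line_numbers : List Int) (out : List Int) : Prop := out = find_notable_lines_alt line_numbers
instance (line_numbers : List Int) (out : List Int) : Decidable (Spec_find_notable_lines line_numbers out) := by unfold Spec_find_notable_lines; infer_instance

-- ===== CLAIM (what is proved, stated in full; the proofs are below) =====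
def Claim_equal_find_notable_lines : Prop := ∀ (line_numbers : List Int), Dom_find_notable_lines line_numbers → Spec_find_notable_lines line_numbers (find_notable_lines line_numbers)

-- ===== LEMMAS AND PROOFS =====

-- 'some adjacent pair of l has gap ≤ 2 and x is one of its ends'
def pvAdjClose : List Int → Int → Prop
  | a :: b :: _rest, x => (b - a ≤ 2 ∧ (x = a ∨ x = b)) ∨ pvAdjClose (b :: _rest) x
  | _, _ => False

lemma pvAdjClose_mem (l : List Int) (x : Int) (h : pvAdjClose l x) : x ∈ l := by
  induction l with
  | nil => simp [pvAdjClose] at h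
  | cons a t ih =>
    cases t with
    | nil => simp [pvAdjClose] at h
    | cons b r =>
      rcases h with ⟨_, h2⟩ | h
      · rcases h2 with rfl | rfl <;> simp
      · exact List.mem_cons_of_mem _ (ih h)

lemma mem_pvMarkPairs (l : List Int) (s : PySem.Set Int) (x : Int) :
    x ∈ pvMarkPairs l s ↔ x ∈ s ∨ pvAdjClose l x := by
  induction l generalizing s with
  | nil => simp [pvMarkPairs, pvAdjClose]
  | cons a t ih =>
    cases t with
    | nil => simp [pvMarkPairs, pvAdjClose]
    | cons b r =>
      show x ∈ pvMarkPairs (b :: r) _ ↔ _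
      rw [ih]
      split_ifs with h
      · simp only [PySem.Set.mem_add, pvAdjClose]
        tauto
      · simp only [pvAdjClose]
        constructor
        · tauto
        · rintro (hs | (⟨h2, _⟩ | hc))
          · tauto
          · omega
          · tauto

-- for a strictly increasing list, 'some other element within 2' = 'an adjacent gap ≤ 2 touching x'
lemma close_iff_adjClose (l : List Int) (hl : l.Pairwise (· < ·)) (x : Int) (hx : x ∈ l) :
    (∃ y ∈ l, y ≠ x ∧ x - 2 ≤ y ∧ y ≤ x + 2) ↔ pvAdjClose l x := by
  induction l with
  | nil => simp at hx
  | cons a t ih =>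
    rcases List.pairwise_cons.mp hl with ⟨ha, ht⟩
    cases t with
    | nil =>
      simp only [List.mem_singleton] at hx
      subst hx
      simp [pvAdjClose]
    | cons b r =>
      have hab : a < b := ha b (by simp)
      have hbmin : ∀ y ∈ b :: r, b ≤ y := by
        intro y hy
        rcases List.mem_cons.mp hy with rfl | hy
        · exact le_refl _
        · exact le_of_lt ((List.pairwise_cons.mp ht).1 y hy)
      rcases List.mem_cons.mp hx with rfl | hxt
      · -- x = a : head case
        have hnotmem : x ∉ b :: r := fun h => absurd (ha x h) (lt_irrefl x)
        constructor
        · rintro ⟨y, hy, hne, h1, h2⟩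
          rcases List.mem_cons.mp hy with rfl | hy
          · exact absurd rfl hne
          · have := hbmin y hy
            exact Or.inl ⟨by omega, Or.inl rfl⟩
        · rintro (⟨hgap, _⟩ | hc)
          · exact ⟨b, by simp, by omega, by omega, by omega⟩
          · exact absurd (pvAdjClose_mem _ _ hc) hnotmem
      · -- x ∈ b :: r : tail case
        have hax : a < x := ha x hxt
        have hbx : b ≤ x := hbmin x hxt
        have iht := ih ht hxt
        constructor
        · rintro ⟨y, hy, hne, h1, h2⟩
          rcases List.mem_cons.mp hy with rfl | hy
          · -- witness is a itself: x - a ≤ 2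
            by_cases hxb : x = b
            · exact Or.inl ⟨by omega, Or.inr hxb⟩
            · have hbx' : b < x := lt_of_le_of_ne hbx (Ne.symm hxb)
              exact Or.inr (iht.mp ⟨b, by simp, by omega, by omega, by omega⟩)
          · exact Or.inr (iht.mp ⟨y, hy, hne, h1, h2⟩)
        · rintro (⟨hgap, hxa | hxb⟩ | hc)
          · exact absurd hxa (by omega)
          · subst hxb
            exact ⟨a, by simp, by omega, by omega, by omega⟩
          · obtain ⟨y, hy, hne, h1, h2⟩ := iht.mpr hc
            exact ⟨y, List.mem_cons_of_mem _ hy, hne, h1, h2⟩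

-- ===== VERDICT (by name: the statement is the Claim_ definition above) =====
theorem find_notable_lines_spec : Claim_equal_find_notable_lines := by
  intro xs _
  unfold Spec_find_notable_lines find_notable_lines find_notable_lines_alt
  rw [PySem.List.foldl_append_if_eq_filter, List.nil_append]
  apply List.filter_congr
  intro x hx
  set uniq := PySem.List.sorted (PySem.Set.ofList xs) (fun x => x) false with huniq
  have hpw : uniq.Pairwise (· < ·) := PySem.List.sorted_ofList_pairwise_lt xs
  have hmemu : ∀ y : Int, y ∈ uniq ↔ y ∈ xs := by
    intro y
    rw [huniq, PySem.List.mem_sorted, PySem.Set.mem_ofList]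
  rw [Bool.eq_iff_iff]
  rw [List.any_eq_true]
  rw [PySem.Set.contains_iff, mem_pvMarkPairs]
  rw [← close_iff_adjClose uniq hpw x ((hmemu x).mpr hx)]
  simp only [PySem.List.mem_pyRange_one, Bool.and_eq_true, Bool.not_eq_eq_eq_not,
    Bool.not_true, beq_eq_false_iff_ne, List.contains_iff_mem]
  constructor
  · rintro ⟨i, ⟨h1, h2⟩, hne, hmem⟩
    exact Or.inr ⟨i, (hmemu i).mpr hmem, hne, by omega, by omega⟩
  · rintro (h | ⟨y, hy, hne, h1, h2⟩)
    · exact absurd h (by simp [PySem.Set.empty])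
    · exact ⟨y, ⟨by omega, by omega⟩, hne, (hmemu y).mp hy⟩
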